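-- pv_equiv track=rewrite | github.com/leehanjun506/Algorithm | 프로그래머스/lv1/72410. 신규 아이디 추천/신규 아이디 추천.py | solution
-- ===== SOURCE A (Python) =====
-- def solution(new_id):
--
--     exceptions = []
--     for i in '~!@#$%^&*()=+[{]}:?,<>/':
--         exceptions.append(i)
--     new_id = new_id.lower()
--     for i in exceptions:
--         new_id = new_id.replace(i,'')
--     new = new_id.split('.')
--     new_id = ''
--     for i in range(len(new)):
--         if new[i] == '':
--             continue
--         else:
--             if new_id == '':
--                 new_id += new[i]
--             else:
--                 if new_id == '':
--                     new_id+=new[i]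
--                 else:
--                     new_id+='.'+new[i]
--     if new_id == '':
--         new_id+='a'
--     if len(new_id)>=16:
--         new_id = new_id[:15]
--         if new_id[-1] == '.':
--             new_id = new_id[:-1]
--     if len(new_id)<=2:
--         while(len(new_id)<3):
--             new_id+=new_id[-1]
--
--     return new_id
-- ===== SOURCE B (Python) =====
-- def solution(new_id):
--     bad = set('~!@#$%^&*()=+[{]}:?,<>/')
--     out = []
--     for c in new_id.lower():
--         if c in bad:
--             continue
--         if c == '.':
--             if out and out[-1] != '.':
--                 out.append('.')
--         else:
--             out.append(c)
--     if out and out[-1] == '.':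
--         out.pop()
--     s = ''.join(out) or 'a'
--     if len(s) >= 16:
--         s = s[:15]
--         if s.endswith('.'):
--             s = s[:-1]
--     if len(s) < 3:
--         s += s[-1] * (3 - len(s))
--     return s
-- ===== Notes on version B (the rewrite author's own statement) =====
-- stated objective: simpler
-- what changed: A makes 24 sequential str.replace passes, then splits on the dot separator and rejoins with an index loop, then pads with a while loop; B does one stateful scan over the lowered characters (filtering bad characters and collapsing/trimming separator runs on the fly) and pads with a closed-form repeat.
import Mathlib
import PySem

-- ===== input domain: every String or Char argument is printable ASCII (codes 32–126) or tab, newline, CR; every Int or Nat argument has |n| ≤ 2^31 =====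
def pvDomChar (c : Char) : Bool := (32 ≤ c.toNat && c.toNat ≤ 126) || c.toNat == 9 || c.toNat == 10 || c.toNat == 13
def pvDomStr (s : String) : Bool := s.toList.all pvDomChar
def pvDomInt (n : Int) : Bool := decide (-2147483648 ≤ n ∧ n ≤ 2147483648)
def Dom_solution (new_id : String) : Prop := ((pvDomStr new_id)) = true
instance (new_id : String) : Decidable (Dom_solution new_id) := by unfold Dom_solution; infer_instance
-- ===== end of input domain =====

-- B replaces A's 24 sequential str.replace passes and the split('.')-then-rejoin loop by one
-- stateful scan over the lowered characters (collapse dots on the fly) plus a closed-form pad;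
-- objective: simpler (one pass instead of many), same results on all inputs.

-- ===== PORT A =====
-- the literal '~!@#$%^&*()=+[{]}:?,<>/'
def pvExcStr : List Char := "~!@#$%^&*()=+[{]}:?,<>/".toList

-- for i in '…': exceptions.append(i)
def pvExceptionsA : List Char := pvExcStr.foldl (fun acc c => acc ++ [c]) []

-- the for-i-in-range(len(new)) join loop of A (with its duplicated inner branch kept)
def pvJoinLoopA (new : List (List Char)) : List Char :=
  (PySem.List.pyRange 0 new.length 1).foldl
    (fun nid i =>
      let part := PySem.List.pyGetD new i []
      if part = [] then nid
      else if nid = [] then nid ++ part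
      else if nid = [] then nid ++ part
      else nid ++ '.' :: part) []

-- while len(new_id) < 3: new_id += new_id[-1]   (A only enters this with a nonempty string,
-- so the pyGetD default is never consulted on reachable states)
def pvPadA (nid : List Char) : List Char :=
  if nid.length < 3 then pvPadA (nid ++ [PySem.List.pyGetD nid (-1) 'a']) else nid
termination_by 3 - nid.length
decreasing_by simp; omega

def solution (new_id : String) : String :=
  let s1 := PySem.Chars.lower new_id.toList
  let s2 := pvExceptionsA.foldl (fun s c => PySem.Chars.replace s [c] []) s1
  let new := PySem.Chars.splitOn s2 ['.']
  let nid := pvJoinLoopA new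
  let nid := if nid = [] then nid ++ ['a'] else nid
  let nid :=
    if 16 ≤ nid.length then
      let t := PySem.List.slice nid none (some 15)
      if PySem.List.pyGet? t (-1) = some '.' then PySem.List.slice t none (some (-1)) else t
    else nid
  let nid := if nid.length ≤ 2 then pvPadA nid else nid
  String.ofList nid

-- ===== PORT B =====
def pvBad : PySem.Set Char := PySem.Set.ofList "~!@#$%^&*()=+[{]}:?,<>/".toList

-- the body of B's single scan
def pvStepB (acc : List Char) (c : Char) : List Char :=
  if PySem.Set.contains pvBad c then acc
  else if c = '.' then
    (if acc ≠ [] ∧ PySem.List.pyGet? acc (-1) ≠ some '.' then acc ++ ['.'] else acc)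
  else acc ++ [c]

def solution_alt (new_id : String) : String :=
  let out := (PySem.Chars.lower new_id.toList).foldl pvStepB []
  let out := if out ≠ [] ∧ PySem.List.pyGet? out (-1) = some '.' then out.dropLast else out
  let s := if out = [] then ['a'] else out
  let s :=
    if 16 ≤ s.length then
      let t := PySem.List.slice s none (some 15)
      if PySem.Chars.endswith t ['.'] then PySem.List.slice t none (some (-1)) else t
    else s
  let s := if s.length < 3 then s ++ List.replicate (3 - s.length) (PySem.List.pyGetD s (-1) 'a') else s
  String.ofList s

-- ===== PRECONDITION & SPEC =====
def Spec_solution (new_id : String) (out : String) : Prop := out = solution_alt new_id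
instance (new_id : String) (out : String) : Decidable (Spec_solution new_id out) := by unfold Spec_solution; infer_instance

-- ===== CLAIM (what is proved, stated in full; the proofs are below) =====
def Claim_equal_solution : Prop := ∀ (new_id : String), Dom_solution new_id → Spec_solution new_id (solution new_id)


-- ===== LEMMAS AND PROOFS =====

-- xs[-1] as an Option is the last element
theorem pvGetNegOne (xs : List Char) : PySem.List.pyGet? xs (-1) = xs.getLast? := by
  rcases xs.eq_nil_or_concat with h | ⟨l, a, h⟩ <;> subst h
  · rfl
  · rw [List.concat_eq_append, PySem.List.pyGet?_neg_one_append_singleton, List.getLast?_concat]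

-- one str.replace pass with a single-char pattern and empty replacement is a filter
theorem pvReplaceGo (c : Char) (fuel : Nat) (l acc : List Char) (h : l.length ≤ fuel) :
    PySem.Chars.replace.go [c] [] fuel l acc = acc.reverse ++ l.filter (fun x => !(x == c)) := by
  induction fuel generalizing l acc with
  | zero =>
    have : l = [] := by cases l <;> simp_all
    subst this; simp [PySem.Chars.replace.go]
  | succ fuel ih =>
    cases l with
    | nil => simp [PySem.Chars.replace.go]
    | cons a t =>
      simp only [List.length_cons] at h
      simp only [PySem.Chars.replace.go]
      by_cases hac : c = a
      · subst hac
        rw [if_pos (by simp [List.isPrefixOf])]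
        simp only [List.length_cons, List.length_nil, List.drop_succ_cons, List.drop_zero,
          List.reverse_nil, List.nil_append]
        rw [ih t acc (by omega)]
        simp [List.filter_cons]
      · rw [if_neg (by simp [List.isPrefixOf, hac])]
        rw [ih t (a :: acc) (by omega)]
        simp [List.filter_cons, show (a == c) = false from by simp [Ne.symm hac]]

theorem pvReplaceFilter (l : List Char) (c : Char) :
    PySem.Chars.replace l [c] [] = l.filter (fun x => !(x == c)) := by
  have := pvReplaceGo c l.length l [] le_rfl
  simpa [PySem.Chars.replace] using this

-- folding single-char replaces over a list of characters filters all of them out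
theorem pvFoldReplace (cs : List Char) (s : List Char) :
    cs.foldl (fun s c => PySem.Chars.replace s [c] []) s
      = s.filter (fun x => !(cs.contains x)) := by
  induction cs generalizing s with
  | nil => simp
  | cons c cs ih =>
    rw [List.foldl_cons, ih, pvReplaceFilter, List.filter_filter]
    apply List.filter_congr
    intro x _
    by_cases h1 : x = c <;> by_cases h2 : x ∈ cs <;> simp [h1, h2]

-- the exact split of a char list on '.'
def pvSplitD : List Char → List (List Char)
  | [] => [[]]
  | c :: t =>
    if c = '.' then [] :: pvSplitD t
    else match pvSplitD t with
      | [] => [[c]]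
      | h :: tl => (c :: h) :: tl

theorem pvSplitD_ne_nil (l : List Char) : pvSplitD l ≠ [] := by
  cases l with
  | nil => simp [pvSplitD]
  | cons c t =>
    simp only [pvSplitD]
    split
    · simp
    · split <;> simp

def pvMapHead (f : List Char → List Char) : List (List Char) → List (List Char)
  | [] => []
  | h :: t => f h :: t

theorem pvSplitOnGo (fuel : Nat) (l cur acc : List Char) (accL : List (List Char))
    (h : l.length ≤ fuel) :
    PySem.Chars.splitOn.go ['.'] fuel l cur accL
      = accL.reverse ++ pvMapHead (fun p => cur.reverse ++ p) (pvSplitD l) := by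
  induction fuel generalizing l cur accL with
  | zero =>
    have : l = [] := by cases l <;> simp_all
    subst this
    simp [PySem.Chars.splitOn.go, pvSplitD, pvMapHead]
  | succ fuel ih =>
    cases l with
    | nil => simp [PySem.Chars.splitOn.go, pvSplitD, pvMapHead]
    | cons a t =>
      simp only [List.length_cons] at h
      simp only [PySem.Chars.splitOn.go, List.isPrefixOf]
      by_cases hac : a = '.'
      · subst hac
        rw [if_pos (by simp [List.isPrefixOf])]
        simp only [List.length_cons, List.length_nil, List.drop_succ_cons, List.drop_zero]
        rw [ih t [] ((cur.reverse) :: accL) (by omega)]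
        simp only [pvSplitD, if_pos rfl, pvMapHead, List.reverse_cons, List.reverse_nil,
          List.nil_append, List.append_assoc, List.singleton_append, List.cons_append]
        rcases hsp : pvSplitD t with _ | ⟨hd, tl⟩
        · exact absurd hsp (pvSplitD_ne_nil t)
        · simp [pvMapHead]
      · rw [if_neg (by simp [List.isPrefixOf]; exact fun h => hac h.symm)]
        rw [ih t (a :: cur) accL (by omega)]
        simp only [pvSplitD, if_neg hac]
        rcases hsp : pvSplitD t with _ | ⟨hd, tl⟩
        · exact absurd hsp (pvSplitD_ne_nil t)
        · simp [pvMapHead]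

theorem pvSplitOnEq (l : List Char) : PySem.Chars.splitOn l ['.'] = pvSplitD l := by
  rw [PySem.Chars.splitOn, pvSplitOnGo (l.length + 1) l [] [] [] (by omega)]
  rcases hsp : pvSplitD l with _ | ⟨hd, tl⟩
  · exact absurd hsp (pvSplitD_ne_nil l)
  · simp [pvMapHead]

-- join functions: pvN = join starting fresh, pvM = mid-part, pvP = at a part boundary with output nonempty
mutual
def pvM : List Char → List Char
  | [] => []
  | c :: t => if c = '.' then pvP t else c :: pvM t
def pvP : List Char → List Char
  | [] => []
  | c :: t => if c = '.' then pvP t else '.' :: c :: pvM t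
end

def pvN : List Char → List Char
  | [] => []
  | c :: t => if c = '.' then pvN t else c :: pvM t

-- B's collapse-scan suffixes from the three states (empty / last non-dot / last dot)
mutual
def pvCW : List Char → List Char
  | [] => []
  | c :: t => if c = '.' then '.' :: pvCD t else c :: pvCW t
def pvCD : List Char → List Char
  | [] => []
  | c :: t => if c = '.' then pvCD t else c :: pvCW t
end

def pvCE : List Char → List Char
  | [] => []
  | c :: t => if c = '.' then pvCE t else c :: pvCW t

-- whether the scan ends in the "just emitted a dot" state
mutual
def pvEW : List Char → Bool
  | [] => false
  | c :: t => if c = '.' then pvED t else pvEW t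
def pvED : List Char → Bool
  | [] => true
  | c :: t => if c = '.' then pvED t else pvEW t
end

def pvEE : List Char → Bool
  | [] => false
  | c :: t => if c = '.' then pvEE t else pvEW t

-- B's scan output = the lazy join plus (possibly) one trailing dot
theorem pvFlagTriple (l : List Char) :
    pvCE l = pvN l ++ (if pvEE l then ['.'] else [])
    ∧ pvCW l = pvM l ++ (if pvEW l then ['.'] else [])
    ∧ '.' :: pvCD l = pvP l ++ (if pvED l then ['.'] else []) := by
  induction l with
  | nil => simp [pvCE, pvCW, pvCD, pvN, pvM, pvP, pvEE, pvEW, pvED]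
  | cons c t ih =>
    obtain ⟨ihE, ihW, ihD⟩ := ih
    by_cases hc : c = '.'
    · subst hc
      refine ⟨?_, ?_, ?_⟩
      · simpa [pvCE, pvN, pvEE] using ihE
      · simpa [pvCW, pvM, pvEW] using ihD
      · simpa [pvCD, pvP, pvED] using ihD
    · refine ⟨?_, ?_, ?_⟩
      · simp [pvCE, pvN, pvEE, hc, ihW]
      · simp [pvCW, pvM, pvEW, hc, ihW]
      · simp [pvCD, pvP, pvED, hc, ihW]

-- the lazy joins never end with a dot
theorem pvNoDotTriple (l : List Char) :
    (pvM l).getLast? ≠ some '.' ∧ (pvP l).getLast? ≠ some '.' ∧ (pvN l).getLast? ≠ some '.' := by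
  induction l with
  | nil => simp [pvM, pvP, pvN]
  | cons c t ih =>
    obtain ⟨ihM, ihP, ihN⟩ := ih
    by_cases hc : c = '.'
    · subst hc
      exact ⟨by simpa [pvM] using ihP, by simpa [pvP] using ihP, by simpa [pvN] using ihN⟩
    · refine ⟨?_, ?_, ?_⟩
      · simp only [pvM, if_neg hc]
        cases hm : pvM t with
        | nil => simp [List.getLast?, hc]
        | cons a s => rw [List.getLast?_cons_cons]; rw [hm] at ihM; exact ihM
      · simp only [pvP, if_neg hc]
        cases hm : pvM t with
        | nil => simp [List.getLast?, hc]
        | cons a s =>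
          rw [List.getLast?_cons_cons, List.getLast?_cons_cons]
          rw [hm] at ihM; exact ihM
      · simp only [pvN, if_neg hc]
        cases hm : pvM t with
        | nil => simp [List.getLast?, hc]
        | cons a s => rw [List.getLast?_cons_cons]; rw [hm] at ihM; exact ihM

-- A's join loop, abstracted over the part list
def pvJstep (nid : List Char) (part : List Char) : List Char :=
  if part = [] then nid
  else if nid = [] then nid ++ part
  else if nid = [] then nid ++ part
  else nid ++ '.' :: part

def pvR : List (List Char) → List Char
  | [] => []
  | p :: ps => if p = [] then pvR ps else '.' :: p ++ pvR ps

def pvJoinNE : List (List Char) → List Char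
  | [] => []
  | p :: ps => if p = [] then pvJoinNE ps else p ++ pvR ps

theorem pvJoinLoopA_eq (new : List (List Char)) :
    pvJoinLoopA new = new.foldl pvJstep [] := by
  unfold pvJoinLoopA
  exact PySem.List.foldl_pyRange_zero_pyGetD new [] pvJstep []

theorem pvJoinFold (ps : List (List Char)) :
    (ps.foldl pvJstep [] = pvJoinNE ps)
    ∧ (∀ acc, acc ≠ [] → ps.foldl pvJstep acc = acc ++ pvR ps) := by
  induction ps with
  | nil => simp [pvJoinNE, pvR]
  | cons p ps ih =>
    obtain ⟨ih1, ih2⟩ := ih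
    constructor
    · by_cases hp : p = []
      · subst hp; simpa [pvJstep, pvJoinNE] using ih1
      · simp only [List.foldl_cons, pvJstep, if_neg hp, if_pos rfl, List.nil_append,
          pvJoinNE, if_neg hp]
        exact ih2 p hp
    · intro acc hacc
      by_cases hp : p = []
      · subst hp; simpa [pvJstep, pvR] using ih2 acc hacc
      · simp only [List.foldl_cons, pvJstep, if_neg hp, if_neg hacc, pvR]
        rw [ih2 (acc ++ '.' :: p) (by simp)]
        simp [if_neg hp]

-- the exact split joined by A's loop is the lazy join
theorem pvSplitTriple (l : List Char) :
    pvJoinNE (pvSplitD l) = pvN l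
    ∧ pvR (pvSplitD l) = pvP l
    ∧ (∀ h tl, pvSplitD l = h :: tl → h ++ pvR tl = pvM l) := by
  induction l with
  | nil =>
    refine ⟨by simp [pvSplitD, pvJoinNE, pvN, pvR], by simp [pvSplitD, pvR, pvP], ?_⟩
    intro h tl he
    simp only [pvSplitD] at he
    cases he
    simp [pvR, pvM]
  | cons c t ih =>
    obtain ⟨ih1, ih2, ih3⟩ := ih
    by_cases hc : c = '.'
    · subst hc
      refine ⟨?_, ?_, ?_⟩
      · simp [pvSplitD, pvJoinNE, pvN, ih1]
      · simp [pvSplitD, pvR, pvP, ih2]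
      · intro h tl he
        simp only [pvSplitD, if_pos rfl] at he
        cases he
        simp [pvM, ih2]
    · rcases hsp : pvSplitD t with _ | ⟨hd, tl0⟩
      · exact absurd hsp (pvSplitD_ne_nil t)
      · have hmid : hd ++ pvR tl0 = pvM t := ih3 hd tl0 hsp
        refine ⟨?_, ?_, ?_⟩
        · simp only [pvSplitD, if_neg hc, hsp, pvJoinNE, pvN, if_neg hc]
          simp [hmid]
        · simp only [pvSplitD, if_neg hc, hsp, pvR, pvP, if_neg hc]
          simp [hmid]
        · intro h tl he
          simp only [pvSplitD, if_neg hc, hsp] at he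
          cases he
          simp [pvM, if_neg hc, hmid]

-- B's scan body once the bad-character test has been discharged
def pvStep' (acc : List Char) (c : Char) : List Char :=
  if c = '.' then
    (if acc ≠ [] ∧ PySem.List.pyGet? acc (-1) ≠ some '.' then acc ++ ['.'] else acc)
  else acc ++ [c]

theorem pvBadEq : pvBad = pvExcStr := by decide

theorem pvStepBFilter (l : List Char) (acc : List Char) :
    l.foldl pvStepB acc = (l.filter (fun c => !(pvExcStr.contains c))).foldl pvStep' acc := by
  induction l generalizing acc with
  | nil => rfl
  | cons c t ih =>
    by_cases hbad : c ∈ pvExcStr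
    · have hmemB : c ∈ pvBad := by rw [pvBadEq]; exact hbad
      have hstep : pvStepB acc c = acc := by simp [pvStepB, hmemB]
      have hf : List.filter (fun c => !pvExcStr.contains c) (c :: t)
          = List.filter (fun c => !pvExcStr.contains c) t := by
        simp [List.filter_cons, hbad]
      rw [List.foldl_cons, hstep, hf, ih]
    · have hnB : c ∉ pvBad := by rw [pvBadEq]; exact hbad
      have hstep : pvStepB acc c = pvStep' acc c := by simp [pvStepB, pvStep', hnB]
      have hf : List.filter (fun c => !pvExcStr.contains c) (c :: t)
          = c :: List.filter (fun c => !pvExcStr.contains c) t := by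
        simp [List.filter_cons, hbad]
      rw [List.foldl_cons, hstep, hf, List.foldl_cons, ih]

theorem pvCollapseFold (l : List Char) (acc : List Char) :
    l.foldl pvStep' acc
      = acc ++ (if acc = [] then pvCE l
                else if acc.getLast? = some '.' then pvCD l else pvCW l) := by
  induction l generalizing acc with
  | nil => simp; split_ifs <;> simp [pvCE, pvCW, pvCD]
  | cons c t ih =>
    rw [List.foldl_cons]
    by_cases hc : c = '.'
    · subst hc
      by_cases ha : acc = []
      · subst ha
        have hs : pvStep' [] '.' = [] := by simp [pvStep']
        rw [hs, ih []]
        simp [pvCE]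
      · by_cases hd : acc.getLast? = some '.'
        · have hs : pvStep' acc '.' = acc := by simp [pvStep', pvGetNegOne, hd]
          rw [hs, ih acc]
          rw [if_neg ha, if_pos hd, if_neg ha, if_pos hd]
          simp [pvCD]
        · have hs : pvStep' acc '.' = acc ++ ['.'] := by simp [pvStep', pvGetNegOne, ha, hd]
          rw [hs, ih (acc ++ ['.'])]
          have h1 : acc ++ ['.'] ≠ [] := by simp
          have h2 : (acc ++ ['.']).getLast? = some '.' := by simp [List.getLast?_concat]
          rw [if_neg h1, if_pos h2, if_neg ha, if_neg hd]
          simp [pvCW]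
    · have hs : pvStep' acc c = acc ++ [c] := by simp [pvStep', hc]
      rw [hs, ih (acc ++ [c])]
      have h1 : acc ++ [c] ≠ [] := by simp
      have h2 : ¬ (acc ++ [c]).getLast? = some '.' := by
        simp [List.getLast?_concat, hc]
      by_cases ha : acc = []
      · subst ha
        rw [if_neg h1, if_neg h2, if_pos rfl]
        simp [pvCE, hc]
      · by_cases hd : acc.getLast? = some '.'
        · rw [if_neg h1, if_neg h2, if_neg ha, if_pos hd]
          simp [pvCD, hc]
        · rw [if_neg h1, if_neg h2, if_neg ha, if_neg hd]
          simp [pvCW, hc]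

-- B's pop stage recovers the lazy join exactly
theorem pvPopEq (l : List Char) :
    (if pvCE l ≠ [] ∧ PySem.List.pyGet? (pvCE l) (-1) = some '.' then (pvCE l).dropLast
     else pvCE l) = pvN l := by
  have hE := (pvFlagTriple l).1
  have hN := (pvNoDotTriple l).2.2
  rw [pvGetNegOne]
  by_cases hf : pvEE l = true
  · rw [hE, if_pos hf]
    rw [if_pos ⟨by simp, by rw [List.getLast?_concat]⟩]
    simp
  · have hf' : ¬ (pvEE l = true) := hf
    rw [hE, if_neg hf', List.append_nil]
    rw [if_neg]
    rintro ⟨-, h2⟩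
    exact hN h2

-- endswith('.') is "last char is a dot"
theorem pvEndsDot (t : List Char) :
    PySem.Chars.endswith t ['.'] = true ↔ t.getLast? = some '.' := by
  rw [PySem.Chars.endswith_iff]
  rcases t.eq_nil_or_concat with h | ⟨l, a, h⟩ <;> subst h
  · simp
  · rw [List.concat_eq_append, List.getLast?_concat]
    constructor
    · rintro ⟨s, hs⟩
      have h1 := congrArg List.getLast? hs
      rw [List.getLast?_concat, List.getLast?_concat] at h1
      exact h1.symm
    · intro h
      cases h
      exact ⟨l, rfl⟩

-- A's while-pad equals the closed-form repeat of the last character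
theorem pvPadEq (s : List Char) (h : s ≠ []) :
    pvPadA s = s ++ List.replicate (3 - s.length) (PySem.List.pyGetD s (-1) 'a') := by
  by_cases h3 : s.length < 3
  · have hlast : PySem.List.pyGetD s (-1) 'a' = s.getLast h := PySem.List.pyGetD_neg_one s 'a' h
    rw [pvPadA, if_pos h3, hlast]
    have h2 : (s ++ [s.getLast h]) ≠ [] := by simp
    rw [pvPadEq (s ++ [s.getLast h]) h2]
    have : PySem.List.pyGetD (s ++ [s.getLast h]) (-1) 'a' = s.getLast h := by
      rw [PySem.List.pyGetD_neg_one_append_singleton]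
    rw [this]
    have hlen : (s ++ [s.getLast h]).length = s.length + 1 := by simp
    rw [hlen, List.append_assoc]
    congr 1
    have : 3 - s.length = (3 - (s.length + 1)) + 1 := by omega
    rw [this, List.replicate_succ]
    simp
  · rw [pvPadA, if_neg h3]
    have : 3 - s.length = 0 := by omega
    simp [this]
termination_by 3 - s.length
decreasing_by simp; omega

-- the final truncate-and-pad stage, identical in both programs
theorem pvTailEq (x : List Char) (hx : x ≠ []) :
    (let nid :=
      if 16 ≤ x.length then
        let t := PySem.List.slice x none (some 15)
        if PySem.List.pyGet? t (-1) = some '.' then PySem.List.slice t none (some (-1)) else t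
      else x
     if nid.length ≤ 2 then pvPadA nid else nid)
    = (let s :=
        if 16 ≤ x.length then
          let t := PySem.List.slice x none (some 15)
          if PySem.Chars.endswith t ['.'] then PySem.List.slice t none (some (-1)) else t
        else x
       if s.length < 3 then s ++ List.replicate (3 - s.length) (PySem.List.pyGetD s (-1) 'a') else s) := by
  simp only []
  by_cases h16 : 16 ≤ x.length
  · rw [if_pos h16, if_pos h16]
    have ht : PySem.List.slice x none (some 15) = x.take 15 := by
      simpa using PySem.List.slice_to_natCast x 15
    have htl : (x.take 15).length = 15 := by simp; omega
    rw [ht]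
    have hcond : (PySem.List.pyGet? (x.take 15) (-1) = some '.')
        ↔ (PySem.Chars.endswith (x.take 15) ['.'] = true) := by
      rw [pvGetNegOne, pvEndsDot]
    by_cases hdot : PySem.List.pyGet? (x.take 15) (-1) = some '.'
    · rw [if_pos hdot, if_pos (hcond.mp hdot)]
      have hsl : PySem.List.slice (x.take 15) none (some (-1)) = (x.take 15).dropLast :=
        PySem.List.slice_to_neg_one (x.take 15)
      rw [hsl]
      have : (x.take 15).dropLast.length = 14 := by simp [htl]
      rw [if_neg (by omega), if_neg (by omega)]
    · rw [if_neg hdot, if_neg (fun h => hdot (hcond.mpr h))]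
      rw [if_neg (by omega), if_neg (by omega)]
  · rw [if_neg h16, if_neg h16]
    have : (x.length ≤ 2) ↔ (x.length < 3) := by omega
    by_cases h2 : x.length < 3
    · rw [if_pos (by omega), if_pos h2]
      exact pvPadEq x hx
    · rw [if_neg (by omega), if_neg h2]

-- ===== VERDICT (by name: the statement is the Claim_ definition above) =====
theorem solution_spec : Claim_equal_solution := by
  intro new_id _
  unfold Spec_solution solution solution_alt
  simp only []
  -- common sanitized character list
  rw [show pvExceptionsA = pvExcStr from by decide] at *
  rw [pvFoldReplace, pvSplitOnEq, pvJoinLoopA_eq, (pvJoinFold _).1,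
    (pvSplitTriple _).1]
  rw [pvStepBFilter, pvCollapseFold]
  simp only [eq_self_iff_true, if_true, List.nil_append]
  set l := (PySem.Chars.lower new_id.toList).filter (fun x => !(pvExcStr.contains x)) with hl
  rw [pvPopEq l]
  by_cases hN : pvN l = []
  · rw [hN]
    simp only [List.nil_append, if_pos rfl, ne_eq]
    have := pvTailEq ['a'] (by simp)
    exact congrArg String.ofList (by simpa using this)
  · rw [if_neg hN, if_neg hN]
    have := pvTailEq (pvN l) hN
    exact congrArg String.ofList (by simpa using this)
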